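-- pv_equiv track=rewrite | github.com/junbangg/Algorithm-Study | Programmers/2019카카오인턴십/1.py | solution
-- ===== SOURCE A (Python) =====
-- import collections
--
-- def solution(board, moves):
--     answer = 0
--     # change to dic
--     dic = collections.defaultdict(collections.deque)
--     for i in range(len(board)):
--         for j in range(len(board[0])):
--             if board[i][j] != 0:
--                 dic[j+1].append(board[i][j])
--     #stack
--     stack = []
--
--     for m in moves:
--         next = 0
--         if dic[m]:
--             next = dic[m].popleft()
--             if stack and stack[-1] == next:
--                 stack.pop()
--                 answer += 2
--             else:
--                 stack.append(next)
--     return answer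
-- ===== SOURCE B (Python) =====
-- def solution(board, moves):
--     width = len(board[0]) if board else 0
--     depth = len(board)
--     # per-column row pointers into the (unmutated) board; no queues are built
--     ptr = [0] * width
--     picked = []
--     for m in moves:
--         if 1 <= m <= width:
--             j = m - 1
--             i = ptr[j]
--             while i < depth and board[i][j] == 0:
--                 i += 1
--             if i < depth:
--                 picked.append(board[i][j])
--                 i += 1
--             ptr[j] = i
--     total = len(picked)
--     # cancel adjacent equal pairs by repeated left-to-right sweeps to a fixpoint
--     changed = True
--     while changed:
--         changed = False
--         i = 0
--         while i + 1 < len(picked):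
--             if picked[i] == picked[i + 1]:
--                 del picked[i:i + 2]
--                 changed = True
--             else:
--                 i += 1
--     return total - len(picked)
-- ===== Notes on version B (the rewrite author's own statement) =====
-- stated objective: alternative
-- what changed: Removes both of A's data structures: picking uses per-column row pointers that scan the unmutated board downward past zeros (no defaultdict of deques, nothing popped), and pair cancellation uses no stack and no running counter, instead repeatedly sweeping the picked sequence deleting adjacent equal pairs to a fixpoint and returning original length minus remaining length.
import Mathlib
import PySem

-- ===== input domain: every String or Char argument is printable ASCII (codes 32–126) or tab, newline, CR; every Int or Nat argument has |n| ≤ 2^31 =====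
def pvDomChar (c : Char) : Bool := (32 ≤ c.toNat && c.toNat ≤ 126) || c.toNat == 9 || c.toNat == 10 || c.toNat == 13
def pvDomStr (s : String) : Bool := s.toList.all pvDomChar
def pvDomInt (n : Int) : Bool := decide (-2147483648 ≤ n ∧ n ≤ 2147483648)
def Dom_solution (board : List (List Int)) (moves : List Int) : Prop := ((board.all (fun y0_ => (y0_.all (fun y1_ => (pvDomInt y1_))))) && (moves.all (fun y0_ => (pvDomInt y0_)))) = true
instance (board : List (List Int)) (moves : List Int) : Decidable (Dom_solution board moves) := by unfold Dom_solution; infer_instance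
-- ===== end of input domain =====

-- B drops A's defaultdict-of-deques and its counting stack: it picks blocks by per-column
-- row pointers scanning the unmutated board past zeros, then cancels adjacent equal pairs
-- by repeated sweeps to a fixpoint and returns picked-count minus remaining-count.
-- Neither program mutates its arguments (B's Python mutates only its own local lists).

-- ===== PORT A =====
-- for j in range(len(board[0])): if board[i][j] != 0: dic[j+1].append(board[i][j])
def aInner (row : List Int) (w : Nat) (d : PySem.Dict Int (List Int)) : PySem.Dict Int (List Int) :=
  (PySem.List.pyRange 0 (w : Int)).foldl (fun d j =>
    if PySem.List.pyGetD row j 0 ≠ 0 then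
      d.insert (j + 1) (d.getD (j + 1) [] ++ [PySem.List.pyGetD row j 0])
    else d) d

-- body of A's move loop: state (dic, stack, answer)
def aStep : PySem.Dict Int (List Int) × List Int × Int → Int → PySem.Dict Int (List Int) × List Int × Int
  | (dic, stack, answer), m =>
    match dic.getD m [] with
    | [] => (dic, stack, answer)
    | next :: rest =>
      let dic := dic.insert m rest
      match stack with
      | top :: stk => if top = next then (dic, stk, answer + 2) else (dic, next :: top :: stk, answer)
      | [] => (dic, [next], answer)

def solution (board : List (List Int)) (moves : List Int) : Int :=
  let w := (PySem.List.pyGetD board 0 []).length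
  let dic := (PySem.List.pyRange 0 (PySem.List.len board)).foldl
    (fun d i => aInner (PySem.List.pyGetD board i []) w d) PySem.Dict.empty
  (moves.foldl aStep (dic, ([] : List Int), (0 : Int))).2.2

-- ===== PORT B =====
-- while i < depth and board[i][j] == 0: i += 1      (fuel = depth - i makes it total)
def scanCol (board : List (List Int)) (j : Int) : Nat → Nat → Nat
  | 0, i => i
  | fuel + 1, i =>
    if PySem.List.pyGetD (PySem.List.pyGetD board (i : Int) []) j 0 = 0 then
      scanCol board j fuel (i + 1)
    else i

-- body of B's move loop: state (ptr, picked)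
def pStep (board : List (List Int)) (depth w : Nat) : List Nat × List Int → Int → List Nat × List Int
  | (ptr, picked), m =>
    if 1 ≤ m ∧ m ≤ (w : Int) then
      let j := (m - 1).toNat
      let i := ptr.getD j 0
      let i' := scanCol board (j : Int) (depth - i) i
      if i' < depth then
        (ptr.set j (i' + 1), picked ++ [PySem.List.pyGetD (PySem.List.pyGetD board (i' : Int) []) (j : Int) 0])
      else (ptr.set j i', picked)
    else (ptr, picked)

-- one left-to-right sweep: delete adjacent equal pairs; snd = whether anything was deleted
def pass1 : List Int → List Int × Bool
  | [] => ([], false)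
  | [x] => ([x], false)
  | x :: y :: rest =>
    if x = y then ((pass1 rest).1, true)
    else
      let r := pass1 (y :: rest)
      (x :: r.1, r.2)

-- while changed: … (fuel = length + 1 makes it total; each changed sweep shrinks the list)
def cancelFix : Nat → List Int → List Int
  | 0, xs => xs
  | fuel + 1, xs =>
    let p := pass1 xs
    if p.2 then cancelFix fuel p.1 else p.1

def solution_alt (board : List (List Int)) (moves : List Int) : Int :=
  let w := (PySem.List.pyGetD board 0 []).length
  let depth := board.length
  let picked := (moves.foldl (pStep board depth w) (List.replicate w 0, ([] : List Int))).2
  let total := (picked.length : Int)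
  let final := cancelFix (picked.length + 1) picked
  total - (final.length : Int)

-- ===== PRECONDITION & SPEC =====
-- Pre_ excludes exactly the inputs where the Python A raises IndexError (a row shorter
-- than the first row, read by board[i][j]); A never returns there.
def Pre_solution (board : List (List Int)) (_moves : List Int) : Prop :=
  ∀ row ∈ board, (PySem.List.pyGetD board 0 []).length ≤ row.length
instance (board : List (List Int)) (moves : List Int) : Decidable (Pre_solution board moves) := by unfold Pre_solution; infer_instance

def pvWitness_solution : List (List Int) × List Int := ([[1, 2], [3, 2]], [1, 2, 2, 1])

def Spec_solution (board : List (List Int)) (moves : List Int) (out : Int) : Prop := out = solution_alt board moves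
instance (board : List (List Int)) (moves : List Int) (out : Int) : Decidable (Spec_solution board moves out) := by unfold Spec_solution; infer_instance

-- ===== CLAIM (what is proved, stated in full; the proofs are below) =====
def Claim_equal_solution : Prop := ∀ (board : List (List Int)) (moves : List Int), Dom_solution board moves → Pre_solution board moves → Spec_solution board moves (solution board moves)

-- ===== LEMMAS AND PROOFS =====

-- proof-only intermediate model: per-column lists and a cancelling stack
def colAt (board : List (List Int)) (j : Nat) : List Int :=
  board.filterMap (fun row =>
    let v := PySem.List.pyGetD row (j : Int) 0
    if v ≠ 0 then some v else none)

def bStep (w : Nat) : List (List Int) × List Int → Int → List (List Int) × List Int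
  | (cols, picked), m =>
    if 1 ≤ m ∧ m ≤ (w : Int) then
      match cols[(m - 1).toNat]? with
      | some (x :: rest) => (cols.set (m - 1).toNat rest, picked ++ [x])
      | _ => (cols, picked)
    else (cols, picked)

def stackStep (stack : List Int) (x : Int) : List Int :=
  match stack with
  | top :: stk => if top = x then stk else x :: top :: stk
  | [] => [x]

-- what A's inner loop contributes to key m: the cell of this row in column m-1, if nonzero
def pickRow (row : List Int) (w : Nat) (m : Int) : List Int :=
  if 1 ≤ m ∧ m ≤ (w : Int) then
    (if PySem.List.pyGetD row (m - 1) 0 ≠ 0 then [PySem.List.pyGetD row (m - 1) 0] else [])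
  else []

lemma aInner_getD (row : List Int) (w : Nat) (d : PySem.Dict Int (List Int)) (m : Int) :
    (aInner row w d).getD m [] = d.getD m [] ++ pickRow row w m := by
  induction w generalizing d with
  | zero =>
    simp [aInner, pickRow, PySem.List.pyRange]
    intro h1 h2; omega
  | succ w ih =>
    have hr : PySem.List.pyRange 0 ((w + 1 : Nat) : Int) = PySem.List.pyRange 0 (w : Int) ++ [(w : Int)] := by
      push_cast
      exact PySem.List.pyRange_one_succ_right (by positivity)
    have hstep : aInner row (w + 1) d =
        (fun d j =>
          if PySem.List.pyGetD row j 0 ≠ 0 then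
            d.insert (j + 1) (d.getD (j + 1) [] ++ [PySem.List.pyGetD row j 0])
          else d) (aInner row w d) (w : Int) := by
      simp only [aInner, hr, List.foldl_append, List.foldl_cons, List.foldl_nil]
    rw [hstep]
    by_cases hv : PySem.List.pyGetD row (w : Int) 0 ≠ 0
    · simp only [hv, ne_eq, not_false_eq_true, if_pos]
      rw [PySem.Dict.getD_insert]
      by_cases hm : m = (w : Int) + 1
      · subst hm
        rw [if_pos rfl, ih]
        have h1 : pickRow row w ((w : Int) + 1) = [] := by
          unfold pickRow
          rw [if_neg (by omega)]
        have h2 : pickRow row (w + 1) ((w : Int) + 1) = [PySem.List.pyGetD row (w : Int) 0] := by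
          have hidx : ((w : Int) + 1 - 1) = (w : Int) := by ring
          unfold pickRow
          rw [if_pos (by push_cast; omega), hidx, if_pos hv]
        rw [h1, h2, List.append_nil]
      · rw [if_neg hm, ih]
        have : pickRow row (w + 1) m = pickRow row w m := by
          unfold pickRow
          by_cases h1 : 1 ≤ m ∧ m ≤ (w : Int)
          · rw [if_pos h1, if_pos ⟨h1.1, by push_cast; omega⟩]
          · rw [if_neg h1, if_neg (by push_cast; omega)]
        rw [this]
    · simp only [hv, ite_false]
      rw [ih]
      have : pickRow row (w + 1) m = pickRow row w m := by
        unfold pickRow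
        by_cases h1 : 1 ≤ m ∧ m ≤ (w : Int)
        · rw [if_pos h1, if_pos ⟨h1.1, by push_cast; omega⟩]
        · by_cases h2 : m = (w : Int) + 1
          · subst h2
            rw [if_neg h1, if_pos (by push_cast; omega)]
            simp only [ne_eq, not_not] at hv
            have hidx : ((w : Int) + 1 - 1) = (w : Int) := by ring
            rw [hidx, if_neg (by simp [hv])]
          · rw [if_neg h1, if_neg (by push_cast; omega)]
      rw [this]

lemma build_getD (w : Nat) (rows : List (List Int)) (d : PySem.Dict Int (List Int)) (m : Int) :
    (rows.foldl (fun d row => aInner row w d) d).getD m []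
      = d.getD m [] ++ rows.flatMap (fun row => pickRow row w m) := by
  induction rows generalizing d with
  | nil => simp
  | cons r rs ih =>
    simp only [List.foldl_cons, List.flatMap_cons]
    rw [ih, aInner_getD, List.append_assoc]

lemma flatMap_pickRow (board : List (List Int)) (w : Nat) (m : Int) :
    board.flatMap (fun row => pickRow row w m)
      = if 1 ≤ m ∧ m ≤ (w : Int) then colAt board (m - 1).toNat else [] := by
  by_cases hv : 1 ≤ m ∧ m ≤ (w : Int)
  · rw [if_pos hv]
    have hmc : ((m - 1).toNat : Int) = m - 1 := by omega
    induction board with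
    | nil => simp [colAt]
    | cons r rs ih =>
      simp only [List.flatMap_cons, colAt, List.filterMap_cons] at *
      rw [ih]
      unfold pickRow
      rw [if_pos hv, hmc]
      by_cases h : PySem.List.pyGetD r (m - 1) 0 ≠ 0
      · simp [h]
      · simp at h; simp [h]
  · rw [if_neg hv]
    simp only [pickRow, if_neg hv]
    simp

lemma stackOf_append (picked : List Int) (x : Int) :
    (picked ++ [x]).foldl stackStep [] = stackStep (picked.foldl stackStep []) x := by
  simp [List.foldl_append]

lemma loop_eq (moves : List Int) : ∀ (d : PySem.Dict Int (List Int)) (cols : List (List Int)) (picked : List Int) (w : Nat),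
    cols.length = w →
    (∀ m : Int, d.getD m [] = if 1 ≤ m ∧ m ≤ (w : Int) then cols.getD (m - 1).toNat [] else []) →
    (moves.foldl aStep (d, picked.foldl stackStep [], (picked.length : Int) - ((picked.foldl stackStep []).length : Int))).2.2
      = (((moves.foldl (bStep w) (cols, picked)).2.length : Int)
          - (((moves.foldl (bStep w) (cols, picked)).2.foldl stackStep []).length : Int)) := by
  induction moves with
  | nil => intro d cols picked w hlen hR; simp
  | cons m ms ih =>
    intro d cols picked w hlen hR
    simp only [List.foldl_cons]
    by_cases hv : 1 ≤ m ∧ m ≤ (w : Int)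
    · have hj : (m - 1).toNat < cols.length := by omega
      have hget : cols[(m - 1).toNat]? = some (cols.getD (m - 1).toNat []) := by
        rw [List.getD_eq_getElem?_getD, List.getElem?_eq_getElem hj]
        simp
      cases hc : cols.getD (m - 1).toNat [] with
      | nil =>
        have hd0 : d.getD m [] = [] := by rw [hR m, if_pos hv, hc]
        have hA : aStep (d, picked.foldl stackStep [], (picked.length : Int) - ((picked.foldl stackStep []).length : Int)) m
            = (d, picked.foldl stackStep [], (picked.length : Int) - ((picked.foldl stackStep []).length : Int)) := by
          simp only [aStep]
          rw [hd0]
        have hget0 : cols[(m - 1).toNat]? = some [] := by rw [hget, hc]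
        have hB : bStep w (cols, picked) m = (cols, picked) := by
          simp only [bStep]
          rw [if_pos hv, hget0]
        rw [hA, hB]
        exact ih d cols picked w hlen hR
      | cons x rest =>
        have hd : d.getD m [] = x :: rest := by rw [hR m, if_pos hv, hc]
        have hget1 : cols[(m - 1).toNat]? = some (x :: rest) := by rw [hget, hc]
        have hB : bStep w (cols, picked) m = (cols.set (m - 1).toNat rest, picked ++ [x]) := by
          simp only [bStep]
          rw [if_pos hv, hget1]
        have hR' : ∀ m' : Int, (d.insert m rest).getD m' []
            = if 1 ≤ m' ∧ m' ≤ (w : Int) then (cols.set (m - 1).toNat rest).getD (m' - 1).toNat [] else [] := by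
          intro m'
          rw [PySem.Dict.getD_insert]
          by_cases hm' : m' = m
          · subst hm'
            rw [if_pos rfl, if_pos hv]
            rw [List.getD_eq_getElem?_getD, List.getElem?_set_self hj]
            rfl
          · rw [if_neg hm', hR m']
            by_cases hv' : 1 ≤ m' ∧ m' ≤ (w : Int)
            · rw [if_pos hv', if_pos hv']
              have hne : (m - 1).toNat ≠ (m' - 1).toNat := by omega
              rw [List.getD_eq_getElem?_getD, List.getD_eq_getElem?_getD, List.getElem?_set_ne hne]
            · rw [if_neg hv', if_neg hv']
        have hlen' : (cols.set (m - 1).toNat rest).length = w := by simp [hlen]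
        have hIH := ih (d.insert m rest) (cols.set (m - 1).toNat rest) (picked ++ [x]) w hlen' hR'
        rw [hB]
        rw [stackOf_append] at hIH
        have hstack : aStep (d, picked.foldl stackStep [], (picked.length : Int) - ((picked.foldl stackStep []).length : Int)) m
            = (d.insert m rest, stackStep (picked.foldl stackStep []) x,
               ((picked ++ [x]).length : Int) - ((stackStep (picked.foldl stackStep []) x).length : Int)) := by
          simp only [aStep]
          rw [hd]
          cases hs : picked.foldl stackStep [] with
          | nil =>
            refine Prod.ext rfl (Prod.ext rfl ?_)
            simp only [stackStep, List.length_append, List.length_cons, List.length_nil]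
            push_cast
            omega
          | cons top stk =>
            by_cases ht : top = x
            · simp only [stackStep, ht, List.length_append, List.length_cons, List.length_nil]
              refine Prod.ext rfl (Prod.ext rfl ?_)
              push_cast
              omega
            · simp only [stackStep, if_neg ht, List.length_append, List.length_cons, List.length_nil]
              refine Prod.ext rfl (Prod.ext rfl ?_)
              push_cast
              omega
        rw [hstack]
        exact hIH
    · have hd0 : d.getD m [] = [] := by rw [hR m, if_neg hv]
      have hA : aStep (d, picked.foldl stackStep [], (picked.length : Int) - ((picked.foldl stackStep []).length : Int)) m
          = (d, picked.foldl stackStep [], (picked.length : Int) - ((picked.foldl stackStep []).length : Int)) := by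
        simp only [aStep]
        rw [hd0]
      have hB : bStep w (cols, picked) m = (cols, picked) := by
        simp only [bStep]
        rw [if_neg hv]
      rw [hA, hB]
      exact ih d cols picked w hlen hR

-- list getD/set helpers used by the loop invariants
lemma getD_set_self' {a : Type} (xs : List a) (j : Nat) (v d : a) (h : j < xs.length) :
    (xs.set j v).getD j d = v := by
  rw [List.getD_eq_getElem?_getD, List.getElem?_set_self h]
  rfl

lemma getD_set_ne' {a : Type} (xs : List a) (j k : Nat) (v d : a) (h : k ≠ j) :
    (xs.set j v).getD k d = xs.getD k d := by
  rw [List.getD_eq_getElem?_getD, List.getElem?_set_ne (fun he => h he.symm),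
    ← List.getD_eq_getElem?_getD]

lemma colAt_cons (row : List Int) (rest : List (List Int)) (j : Nat) :
    colAt (row :: rest) j
      = (if row.getD j 0 ≠ 0 then [row.getD j 0] else []) ++ colAt rest j := by
  by_cases h : row.getD j 0 = 0
  · rw [List.getD_eq_getElem?_getD] at h
    simp [colAt, h]
  · rw [List.getD_eq_getElem?_getD] at h
    simp [colAt, h]

lemma stackStep_cons (top : Int) (t : List Int) (x : Int) :
    stackStep (top :: t) x = if top = x then t else x :: top :: t := rfl

-- the cancelling stack never holds two equal adjacent elements
lemma chain_stackStep (s : List Int) (a : Int) (h : s.IsChain Ne) : (stackStep s a).IsChain Ne := by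
  cases s with
  | nil => exact List.isChain_singleton a
  | cons top t =>
    by_cases ht : top = a
    · rw [stackStep_cons, if_pos ht]
      exact h.tail
    · rw [stackStep_cons, if_neg ht]
      exact List.isChain_cons_cons.mpr ⟨fun he : a = top => ht he.symm, h⟩

lemma stackStep_twice (s : List Int) (a : Int) (h : s.IsChain Ne) :
    stackStep (stackStep s a) a = s := by
  cases s with
  | nil => simp [stackStep]
  | cons top t =>
    by_cases ht : top = a
    · subst ht
      rw [stackStep_cons, if_pos rfl]
      cases t with
      | nil => rfl
      | cons u t' =>
        have hne : top ≠ u := List.rel_of_isChain_cons_cons h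
        rw [stackStep_cons, if_neg (fun he : u = top => hne he.symm)]
    · rw [stackStep_cons, if_neg ht, stackStep_cons, if_pos rfl]

-- one sweep does not change the stack normal form
lemma pass1_fold (xs : List Int) : ∀ (s : List Int), s.IsChain Ne →
    (pass1 xs).1.foldl stackStep s = xs.foldl stackStep s := by
  induction xs using pass1.induct with
  | case1 => intro s _; rfl
  | case2 x => intro s _; rfl
  | case3 y rest ih =>
    intro s hs
    simp only [pass1, List.foldl_cons]
    rw [stackStep_twice s y hs]
    exact ih s hs
  | case4 x y rest hxy ih =>
    intro s hs
    simp only [pass1, if_neg hxy, List.foldl_cons]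
    exact ih (stackStep s x) (chain_stackStep s x hs)

-- an unchanged sweep means: nothing was deleted and no adjacent pair remains
lemma pass1_false (xs : List Int) : (pass1 xs).2 = false → (pass1 xs).1 = xs ∧ xs.IsChain Ne := by
  induction xs using pass1.induct with
  | case1 => intro _; exact ⟨rfl, List.isChain_nil⟩
  | case2 x => intro _; exact ⟨rfl, List.isChain_singleton x⟩
  | case3 y rest ih =>
    intro h
    simp [pass1] at h
  | case4 x y rest hxy ih =>
    intro h
    simp only [pass1, if_neg hxy] at h ⊢
    obtain ⟨h1, h2⟩ := ih h
    exact ⟨by rw [h1], List.isChain_cons_cons.mpr ⟨hxy, h2⟩⟩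

-- a changed sweep strictly shrinks the list
lemma pass1_len (xs : List Int) :
    (pass1 xs).1.length + (if (pass1 xs).2 then 2 else 0) ≤ xs.length := by
  induction xs using pass1.induct with
  | case1 => simp [pass1]
  | case2 x => simp [pass1]
  | case3 y rest ih =>
    by_cases hb : (pass1 rest).2 <;> simp [pass1, hb] at ih ⊢ <;> omega
  | case4 x y rest hxy ih =>
    by_cases hb : (pass1 (y :: rest)).2 <;> simp [pass1, hxy, hb] at ih ⊢ <;> omega

-- a pair-free list folds to its reverse
lemma fold_of_chain (xs : List Int) : ∀ (s : List Int), xs.IsChain Ne →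
    (∀ a b, xs.head? = some a → s.head? = some b → a ≠ b) →
    xs.foldl stackStep s = xs.reverse ++ s := by
  induction xs with
  | nil => intro s _ _; simp
  | cons x rest ih =>
    intro s hc hh
    have hstep : stackStep s x = x :: s := by
      cases s with
      | nil => rfl
      | cons b t =>
        have hbx : b ≠ x := (hh x b rfl rfl).symm
        rw [stackStep_cons, if_neg hbx]
    simp only [List.foldl_cons, hstep]
    have hrest : rest.foldl stackStep (x :: s) = rest.reverse ++ (x :: s) := by
      apply ih (x :: s) hc.tail
      intro a b ha hb
      cases rest with
      | nil => simp at ha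
      | cons r rs =>
        rw [List.head?_cons, Option.some.injEq] at ha hb
        subst ha; subst hb
        exact (List.rel_of_isChain_cons_cons hc).symm
    rw [hrest]
    simp

lemma cancelFix_len : ∀ (fuel : Nat) (xs : List Int), xs.length ≤ fuel →
    (cancelFix fuel xs).length = (xs.foldl stackStep []).length := by
  intro fuel
  induction fuel with
  | zero =>
    intro xs h
    have hnil : xs = [] := List.eq_nil_of_length_eq_zero (by omega)
    subst hnil; rfl
  | succ fuel ih =>
    intro xs h
    cases hch : (pass1 xs).2 with
    | false =>
      obtain ⟨h1, h2⟩ := pass1_false xs hch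
      have hc : cancelFix (fuel + 1) xs = (pass1 xs).1 := by simp [cancelFix, hch]
      rw [hc, h1, fold_of_chain xs [] h2 (by intro a b _ hb; simp at hb)]
      simp
    | true =>
      have hlen := pass1_len xs
      rw [hch, if_pos rfl] at hlen
      have hc : cancelFix (fuel + 1) xs = cancelFix fuel (pass1 xs).1 := by
        simp [cancelFix, hch]
      rw [hc, ih (pass1 xs).1 (by omega), pass1_fold xs [] List.isChain_nil]

-- the pointer scan finds exactly the head of the remaining column
lemma scan_spec (board : List (List Int)) (j : Nat) :
    ∀ (fuel i : Nat), fuel = board.length - i → i ≤ board.length →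
    (i ≤ scanCol board (j : Int) fuel i ∧ scanCol board (j : Int) fuel i ≤ board.length ∧
      colAt (board.drop i) j =
        (if scanCol board (j : Int) fuel i < board.length then
          ((board.getD (scanCol board (j : Int) fuel i) []).getD j 0)
            :: colAt (board.drop (scanCol board (j : Int) fuel i + 1)) j
        else [])) := by
  intro fuel
  induction fuel with
  | zero =>
    intro i hf hi
    have hieq : i = board.length := by omega
    subst hieq
    refine ⟨le_refl _, le_refl _, ?_⟩
    simp only [scanCol]
    rw [if_neg (lt_irrefl _), List.drop_eq_nil_of_le (le_refl _)]
    simp [colAt]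
  | succ fuel ih =>
    intro i hf hi
    have hilt : i < board.length := by omega
    have hrow : PySem.List.pyGetD board ((i : Nat) : Int) [] = board.getD i [] := by simp
    have hdrop : board.drop i = board.getD i [] :: board.drop (i + 1) := by
      rw [List.getD_eq_getElem?_getD, List.getElem?_eq_getElem hilt, Option.getD_some]
      exact List.drop_eq_getElem_cons hilt
    have hcond : PySem.List.pyGetD (PySem.List.pyGetD board ((i : Nat) : Int) []) ((j : Nat) : Int) 0
        = (board.getD i []).getD j 0 := by simp
    by_cases hz : (board.getD i []).getD j 0 = 0
    · have hsc : scanCol board (j : Int) (fuel + 1) i = scanCol board (j : Int) fuel (i + 1) := by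
        simp only [scanCol]
        rw [hcond, if_pos hz]
      obtain ⟨a1, a2, a3⟩ := ih (i + 1) (by omega) (by omega)
      rw [hsc]
      refine ⟨by omega, a2, ?_⟩
      rw [hdrop, colAt_cons, if_neg (not_not_intro hz)]
      simpa using a3
    · have hsc : scanCol board (j : Int) (fuel + 1) i = i := by
        simp only [scanCol]
        rw [hcond, if_neg hz]
      rw [hsc]
      refine ⟨le_refl _, by omega, ?_⟩
      rw [if_pos hilt, hdrop, colAt_cons, if_pos hz]
      simp

-- B's pointer loop picks the same sequence as the column-list loop
lemma ploop (board : List (List Int)) (w : Nat) (moves : List Int) :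
    ∀ (ptr : List Nat) (cols : List (List Int)) (picked : List Int),
    ptr.length = w → cols.length = w →
    (∀ j, j < w → ptr.getD j 0 ≤ board.length ∧
        cols.getD j [] = colAt (board.drop (ptr.getD j 0)) j) →
    (moves.foldl (pStep board board.length w) (ptr, picked)).2
      = (moves.foldl (bStep w) (cols, picked)).2 := by
  induction moves with
  | nil => intro ptr cols picked _ _ _; rfl
  | cons m ms ih =>
    intro ptr cols picked hpl hcl hinv
    simp only [List.foldl_cons]
    by_cases hv : 1 ≤ m ∧ m ≤ (w : Int)
    · set j := (m - 1).toNat with hj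
      have hjw : j < w := by omega
      set i := ptr.getD j 0 with hi
      obtain ⟨hile, hcols⟩ := hinv j hjw
      rw [← hi] at hile hcols
      obtain ⟨s1, s2, s3⟩ := scan_spec board j (board.length - i) i rfl hile
      set i' := scanCol board (j : Int) (board.length - i) i with hi'
      have hget : cols[j]? = some (cols.getD j []) := by
        rw [List.getD_eq_getElem?_getD, List.getElem?_eq_getElem (by omega)]
        simp
      by_cases hlt : i' < board.length
      · rw [if_pos hlt] at s3
        set v := PySem.List.pyGetD (PySem.List.pyGetD board ((i' : Nat) : Int) []) ((j : Nat) : Int) 0 with hvdef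
        have hveq : v = (board.getD i' []).getD j 0 := by simp [hvdef]
        have hP : pStep board board.length w (ptr, picked) m = (ptr.set j (i' + 1), picked ++ [v]) := by
          simp only [pStep]
          rw [if_pos hv, ← hj, ← hi, ← hi', if_pos hlt]
        have hcolsv : cols.getD j [] = v :: colAt (board.drop (i' + 1)) j := by
          rw [hcols, s3, hveq]
        have hgetv : cols[j]? = some (v :: colAt (board.drop (i' + 1)) j) := by rw [hget, hcolsv]
        have hBt : bStep w (cols, picked) m = (cols.set j (colAt (board.drop (i' + 1)) j), picked ++ [v]) := by
          simp only [bStep]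
          rw [if_pos hv, ← hj, hgetv]
        rw [hP, hBt]
        apply ih
        · simp [hpl]
        · simp [hcl]
        · intro k hk
          by_cases hkj : k = j
          · subst hkj
            refine ⟨?_, ?_⟩
            · rw [getD_set_self' ptr j (i' + 1) 0 (by omega)]
              omega
            · rw [getD_set_self' ptr j (i' + 1) 0 (by omega),
                getD_set_self' cols j (colAt (board.drop (i' + 1)) j) [] (by omega)]
          · obtain ⟨b1, b2⟩ := hinv k hk
            rw [getD_set_ne' ptr j k (i' + 1) 0 hkj, getD_set_ne' cols j k _ [] hkj]
            exact ⟨b1, b2⟩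
      · rw [if_neg hlt] at s3
        have hieq : i' = board.length := by omega
        have hP : pStep board board.length w (ptr, picked) m = (ptr.set j i', picked) := by
          simp only [pStep]
          rw [if_pos hv, ← hj, ← hi, ← hi', if_neg hlt]
        have hget0 : cols[j]? = some [] := by rw [hget, hcols, s3]
        have hBt : bStep w (cols, picked) m = (cols, picked) := by
          simp only [bStep]
          rw [if_pos hv, ← hj, hget0]
        rw [hP, hBt]
        apply ih
        · simp [hpl]
        · exact hcl
        · intro k hk
          by_cases hkj : k = j
          · subst hkj
            refine ⟨?_, ?_⟩
            · rw [getD_set_self' ptr j i' 0 (by omega)]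
              omega
            · rw [getD_set_self' ptr j i' 0 (by omega), hcols, s3, hieq,
                List.drop_eq_nil_of_le (le_refl _)]
              simp [colAt]
          · obtain ⟨b1, b2⟩ := hinv k hk
            rw [getD_set_ne' ptr j k i' 0 hkj]
            exact ⟨b1, b2⟩
    · have hP : pStep board board.length w (ptr, picked) m = (ptr, picked) := by
        simp only [pStep]
        rw [if_neg hv]
      have hBt : bStep w (cols, picked) m = (cols, picked) := by
        simp only [bStep]
        rw [if_neg hv]
      rw [hP, hBt]
      exact ih ptr cols picked hpl hcl hinv

-- ===== VERDICT (by name: the statement is the Claim_ definition above) =====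
theorem solution_spec : Claim_equal_solution := by
  intro board moves _ _
  show solution board moves = solution_alt board moves
  simp only [solution, solution_alt]
  set w := (PySem.List.pyGetD board 0 []).length with hw
  have hbuild : ∀ m : Int,
      ((PySem.List.pyRange 0 (PySem.List.len board)).foldl
        (fun d i => aInner (PySem.List.pyGetD board i []) w d) PySem.Dict.empty).getD m []
      = if 1 ≤ m ∧ m ≤ (w : Int) then ((List.range w).map (colAt board)).getD (m - 1).toNat [] else [] := by
    intro m
    have h0 : (0 : Int) ≤ 0 := le_refl 0
    rw [PySem.List.foldl_pyRange_pyGetD board [] (fun d row => aInner row w d) PySem.Dict.empty h0]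
    simp only [Int.toNat_zero, List.drop_zero]
    rw [build_getD, PySem.Dict.getD_empty, List.nil_append, flatMap_pickRow]
    by_cases hv : 1 ≤ m ∧ m ≤ (w : Int)
    · rw [if_pos hv, if_pos hv]
      have hj2 : m.toNat - 1 < w := by omega
      have hq : (m - 1).toNat = m.toNat - 1 := by omega
      rw [hq, List.getD_eq_getElem?_getD, List.getElem?_map, List.getElem?_range hj2,
        Option.map_some, Option.getD_some]
    · rw [if_neg hv, if_neg hv]
  have hlen : ((List.range w).map (colAt board)).length = w := by simp
  have hA := loop_eq moves
    ((PySem.List.pyRange 0 (PySem.List.len board)).foldl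
      (fun d i => aInner (PySem.List.pyGetD board i []) w d) PySem.Dict.empty)
    ((List.range w).map (colAt board)) [] w hlen hbuild
  simp only [List.foldl_nil, List.length_nil, Nat.cast_zero, sub_self] at hA
  have hpick := ploop board w moves (List.replicate w 0) ((List.range w).map (colAt board)) []
    (by simp) hlen
    (by
      intro j hj
      have hrep : (List.replicate w 0).getD j 0 = 0 := by
        rw [List.getD_eq_getElem?_getD, List.getElem?_replicate]
        simp [hj]
      refine ⟨by rw [hrep]; omega, ?_⟩
      rw [hrep, List.drop_zero, List.getD_eq_getElem?_getD, List.getElem?_map,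
        List.getElem?_range hj, Option.map_some, Option.getD_some])
  set pickedB := (moves.foldl (pStep board board.length w) (List.replicate w 0, ([] : List Int))).2 with hpb
  set pickedC := (moves.foldl (bStep w) ((List.range w).map (colAt board), ([] : List Int))).2 with hpc
  have hcan := cancelFix_len (pickedB.length + 1) pickedB (by omega)
  rw [hA, ← hpick, hcan]
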